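-- pv_equiv track=rewrite | github.com/GenuinelyAref/Electeng101-Learnings | Bases/num_expansion.py | full_expansion
-- ===== SOURCE A (Python) =====
-- def special_num(num, var_type, sign):
--     # define subscript unicode character lists
--     if var_type == "sub":
--         unicode_chars = ['\u2080', '\u2081', '\u2082', '\u2083', '\u2084',
--                          '\u2085', '\u2086', '\u2087', '\u2088', '\u2089']
--     # define superscript unicode character list
--     else:
--         unicode_chars = ['\u2070', '\u00b9', '\u00b2', '\u00b3', '\u2074',
--                          '\u2075', '\u2076', '\u2077', '\u2078', '\u2079']
--     negative_superscript = "\u207B"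
--     # define used variable
--     special_text = ""
--     # repeat for each digit in the number provided
--     for i in range(0, len(str(num))):
--         # convert each digit into its subscript unicode equivalent
--         special_text += unicode_chars[int((str(num))[i])]
--     if sign == "-":
--         special_text = negative_superscript + special_text
--     # return subscript unicode equivalent to caller (ready to print)
--     return special_text
--
-- def expanded_term(var_digit, var_base, var_place_value, var_sign):
--     var_expanded_term = "{}x{}{}".format(var_digit, var_base, special_num(var_place_value, "super", var_sign))
--     return var_expanded_term
--
-- def full_expansion(var_num, var_base):
--     # define output variable
--     expanded_text = ""
--     # convert number into list, each character as a list item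
--     str_var_num = list(str(var_num))
--     # check for a decimal point
--     try:
--         dot_index = str_var_num.index(".")
--         # if one is found, then collect its index and remove it from list
--         str_var_num.pop(dot_index)
--     except ValueError:
--         # otherwise set index to -1
--         dot_index = -1
--     # get number of characters in number
--     var_digits = len(str_var_num)
--
--     # if number has no decimal part
--     if dot_index == -1:
--         # go down each digit
--         for digit in range(var_digits - 1, -1, -1):
--             # get digit from number
--             var_digit = str_var_num[var_digits - digit - 1]
--             # if it's not the last digit, add a "+" and <space> at the end
--             if digit != 0:
--                 expanded_text += "{} + ".format(expanded_term(var_digit, var_base, digit, "+"))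
--             # otherwise no space or plus sign
--             else:
--                 expanded_text += "{}".format(expanded_term(var_digit, var_base, digit, "+"))
--
--     # if number has a decimal point
--     else:
--         # go down each digit
--         for digit in range(0, var_digits):
--             # get power of base
--             var_placeholder = dot_index - digit - 1
--             # adjust negative powers to display correctly
--             if var_placeholder < 0:
--                 var_sign = "-"
--                 var_placeholder = var_placeholder * -1
--             else:
--                 var_sign = "+"
--             # get digit from list
--             var_digit = str_var_num[digit]
--             # if it's not the last digit, add a "+" and <space> at the end
--             if digit != var_digits - 1:
--                 expanded_text += "{} + ".format(expanded_term(var_digit, var_base, var_placeholder, var_sign))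
--             # otherwise no space or plus sign
--             else:
--                 expanded_text += "{}".format(expanded_term(var_digit, var_base, var_placeholder, var_sign))
--
--     return expanded_text
-- ===== SOURCE B (Python) =====
-- SUPS = '\u2070\u00b9\u00b2\u00b3\u2074\u2075\u2076\u2077\u2078\u2079'
--
--
-- def _sup(n):
--     # superscript of a nonnegative integer by arithmetic digit extraction,
--     # built back-to-front with % 10 and // 10 (no str() round-trip)
--     out = SUPS[n % 10]
--     n //= 10
--     while n:
--         out = SUPS[n % 10] + out
--         n //= 10
--     return out
--
--
-- def full_expansion(var_num, var_base):
--     head, _, tail = str(var_num).partition('.')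
--     chars = head + tail
--     # walk the digits right-to-left with an incrementing exponent counter,
--     # collecting the terms back-to-front
--     parts = []
--     e = len(head) - len(chars)
--     for ch in reversed(chars):
--         sup = ('\u207B' + _sup(-e)) if e < 0 else _sup(e)
--         parts.append('{}x{}{}'.format(ch, var_base, sup))
--         e += 1
--     return ' + '.join(reversed(parts))
-- ===== Notes on version B (the rewrite author's own statement) =====
-- stated objective: alternative
-- what changed: Instead of A's two separate left-to-right branch loops (a countdown loop re-deriving indices for integers, a forward loop with manual sign splitting for decimals) that append terms and special-case the last '+', B splits once at the first dot, then walks the digits right-to-left with an incrementing exponent counter, collecting the terms back-to-front and joining the reversed list, and renders superscripts by arithmetic digit extraction (% 10, // 10) instead of a str() round-trip over the place value. …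
import Mathlib
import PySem

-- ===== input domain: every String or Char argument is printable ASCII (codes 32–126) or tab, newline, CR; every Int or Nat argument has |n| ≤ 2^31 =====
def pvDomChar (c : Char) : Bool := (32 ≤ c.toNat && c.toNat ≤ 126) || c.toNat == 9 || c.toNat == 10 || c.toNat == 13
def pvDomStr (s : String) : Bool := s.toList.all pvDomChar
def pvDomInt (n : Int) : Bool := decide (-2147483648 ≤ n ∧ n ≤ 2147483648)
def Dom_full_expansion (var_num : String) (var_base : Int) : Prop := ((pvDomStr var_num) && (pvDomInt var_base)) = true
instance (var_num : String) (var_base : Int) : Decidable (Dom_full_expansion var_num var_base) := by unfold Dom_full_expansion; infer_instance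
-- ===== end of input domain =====

-- B replaces A's two index-juggling branch loops by a single right-to-left walk that
-- builds the result back-to-front with an incrementing exponent counter, and computes
-- superscripts by arithmetic digit extraction (% 10, // 10) instead of a str() round-trip
-- (objective: alternative).
-- Both ports work on List Char and wrap the result with String.ofList at the end,
-- which is exact for Python string concatenation.

-- ===== PORT A =====
def pySubChars : List Char :=
  ['\u2080', '\u2081', '\u2082', '\u2083', '\u2084', '\u2085', '\u2086', '\u2087', '\u2088', '\u2089']
def pySupChars : List Char :=
  ['\u2070', '\u00b9', '\u00b2', '\u00b3', '\u2074', '\u2075', '\u2076', '\u2077', '\u2078', '\u2079']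

-- special_num: the `.getD []` totalizes `unicode_chars[int(str(num)[i])]`; it is exact for
-- num ≥ 0 (then every character of str(num) is a decimal digit and the index is in range),
-- which holds at every call site inside full_expansion.
def special_num (num : Int) (var_type : String) (sign : String) : List Char :=
  let unicode_chars := if var_type == "sub" then pySubChars else pySupChars
  let special_text := (PySem.Int.toChars num).foldl
    (fun acc c =>
      acc ++ ((((PySem.Int.ofChars? [c]).bind
        (fun k => PySem.List.pyGet? unicode_chars k)).map (fun ch => [ch])).getD [])) []
  if sign == "-" then '\u207B' :: special_text else special_text

def expanded_term (var_digit : List Char) (var_base : Int)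
    (var_place_value : Int) (var_sign : String) : List Char :=
  var_digit ++ ['x'] ++ PySem.Int.toChars var_base ++ special_num var_place_value "super" var_sign

def full_expansion (var_num : String) (var_base : Int) : String :=
  let str0 := var_num.toList
  -- try: dot_index = str_var_num.index("."); str_var_num.pop(dot_index)  except ValueError: dot_index = -1
  let p : Int × List Char :=
    match PySem.List.index? str0 '.' with
    | some i => ((i : Int), ((PySem.List.pop? str0 (i : Int)).map Prod.snd).getD str0)
    | none => (-1, str0)
  let dot_index := p.1
  let str_var_num := p.2
  let var_digits : Int := str_var_num.length
  let out : List Char :=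
    if dot_index == -1 then
      (PySem.List.pyRange (var_digits - 1) (-1) (-1)).foldl
        (fun acc digit =>
          let var_digit :=
            ((PySem.List.pyGet? str_var_num (var_digits - digit - 1)).map (fun c => [c])).getD []
          if digit ≠ 0 then
            acc ++ expanded_term var_digit var_base digit "+" ++ [' ', '+', ' ']
          else
            acc ++ expanded_term var_digit var_base digit "+") []
    else
      (PySem.List.pyRange 0 var_digits 1).foldl
        (fun acc digit =>
          let raw := dot_index - digit - 1
          let sp : String × Int := if raw < 0 then ("-", -raw) else ("+", raw)
          let var_digit :=
            ((PySem.List.pyGet? str_var_num digit).map (fun c => [c])).getD []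
          if digit ≠ var_digits - 1 then
            acc ++ expanded_term var_digit var_base sp.2 sp.1 ++ [' ', '+', ' ']
          else
            acc ++ expanded_term var_digit var_base sp.2 sp.1) []
  String.ofList out

-- ===== PORT B =====
def pySupsB : List Char :=
  ['\u2070', '\u00b9', '\u00b2', '\u00b3', '\u2074', '\u2075', '\u2076', '\u2077', '\u2078', '\u2079']

-- the while-loop of _sup; the `.getD ' '` totalizes `SUPS[n % 10]`, exact since n % 10 < 10
def supLoop : Nat → List Char → List Char
  | 0, out => out
  | n + 1, out => supLoop ((n + 1) / 10) (pySupsB.getD ((n + 1) % 10) ' ' :: out)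
  decreasing_by omega

-- _sup(n); its Python argument is a nonnegative int at every call site, so the port takes a Nat
def supB (n : Nat) : List Char := supLoop (n / 10) [pySupsB.getD (n % 10) ' ']

-- the body of B's `for ch in reversed(chars)` loop, on state (parts, e)
def stepB (var_base : Int) (st : List (List Char) × Int) (ch : Char) : List (List Char) × Int :=
  let e := st.2
  let sup := if e < 0 then '\u207B' :: supB (-e).toNat else supB e.toNat
  (st.1 ++ [ch :: 'x' :: (PySem.Int.toChars var_base ++ sup)], e + 1)

def full_expansion_alt (var_num : String) (var_base : Int) : String :=
  let s := var_num.toList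
  -- str.partition('.') at the first dot, ported via index? + take/drop (exact)
  let pp : List Char × List Char :=
    match PySem.List.index? s '.' with
    | some i => (s.take i, s.drop (i + 1))
    | none => (s, [])
  let chars := pp.1 ++ pp.2
  let res := chars.reverse.foldl (stepB var_base)
    ([], (pp.1.length : Int) - (chars.length : Int))
  String.ofList (PySem.Chars.join [' ', '+', ' '] res.1.reverse)

-- ===== PRECONDITION & SPEC =====
def Spec_full_expansion (var_num : String) (var_base : Int) (out : String) : Prop := out = full_expansion_alt var_num var_base
instance (var_num : String) (var_base : Int) (out : String) : Decidable (Spec_full_expansion var_num var_base out) := by unfold Spec_full_expansion; infer_instance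

-- ===== CLAIM (what is proved, stated in full; the proofs are below) =====
def Claim_equal_full_expansion : Prop := ∀ (var_num : String) (var_base : Int), Dom_full_expansion var_num var_base → Spec_full_expansion var_num var_base (full_expansion var_num var_base)

-- ===== LEMMAS AND PROOFS =====

def pvDigits : List Char := ['0', '1', '2', '3', '4', '5', '6', '7', '8', '9']

def toSup (c : Char) : Char :=
  match c with
  | '0' => '\u2070' | '1' => '\u00b9' | '2' => '\u00b2' | '3' => '\u00b3' | '4' => '\u2074'
  | '5' => '\u2075' | '6' => '\u2076' | '7' => '\u2077' | '8' => '\u2078' | '9' => '\u2079'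
  | _ => ' '

-- the common superscript shape both programs produce (used only by the proofs)
def pvSup (p : Int) : List Char :=
  (if p < 0 then ['\u207B'] else []) ++ (Nat.toDigits 10 p.natAbs).map toSup

-- the common shape of one term (used only by the proofs)
def pvT (cs : List Char) (base pivot : Int) (k : Nat) : List Char :=
  cs.getD k ' ' :: 'x' :: (PySem.Int.toChars base ++ pvSup (pivot - (k : Int) - 1))

-- proof-side twin of supLoop producing plain digit characters
def dLoop : Nat → List Char → List Char
  | 0, out => out
  | n + 1, out => dLoop ((n + 1) / 10) (Nat.digitChar ((n + 1) % 10) :: out)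
  decreasing_by omega

lemma mem_toDigitsCore (f : Nat) : ∀ (n : Nat) (acc : List Char),
    (∀ c ∈ acc, c ∈ pvDigits) → ∀ c ∈ Nat.toDigitsCore 10 f n acc, c ∈ pvDigits := by
  induction f with
  | zero => intro n acc hacc c hc; exact hacc c hc
  | succ f ih =>
    intro n acc hacc c hc
    have hd : Nat.digitChar (n % 10) ∈ pvDigits := by
      have h10 : n % 10 < 10 := Nat.mod_lt _ (by norm_num)
      interval_cases h : (n % 10) <;> simp [Nat.digitChar, pvDigits]
    simp only [Nat.toDigitsCore] at hc
    split at hc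
    · rcases List.mem_cons.mp hc with h | h
      · exact h ▸ hd
      · exact hacc c h
    · refine ih _ _ ?_ c hc
      intro d hdm
      rcases List.mem_cons.mp hdm with h | h
      · exact h ▸ hd
      · exact hacc d h

lemma mem_toDigits (n : Nat) : ∀ c ∈ Nat.toDigits 10 n, c ∈ pvDigits := by
  intro c hc
  exact mem_toDigitsCore _ _ _ (by simp) c hc

-- on decimal digit characters, A's int()+list-index chain yields the toSup character
lemma chain_eq_toSup (c : Char) (hc : c ∈ pvDigits) :
    ((((PySem.Int.ofChars? [c]).bind
      (fun k => PySem.List.pyGet? pySupChars k)).map (fun ch => [ch])).getD [])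
    = [toSup c] := by
  fin_cases hc <;> decide

lemma toChars_natAbs (m : Nat) : PySem.Int.toChars ((m : Int)) = Nat.toDigits 10 m := by
  simp [PySem.Int.toChars]

-- A's special_num with the sign/magnitude split equals the common superscript shape
lemma special_eq_pvSup (p : Int) :
    special_num (if p < 0 then -p else p) "super" (if p < 0 then "-" else "+") = pvSup p := by
  have hm : (if p < 0 then -p else p) = ((p.natAbs : Int)) := by split <;> omega
  rw [hm]
  unfold special_num pvSup
  simp only [show (("super" : String) == "sub") = false from by decide, Bool.false_eq_true,
    if_false]
  rw [toChars_natAbs, PySem.List.foldl_append_eq_flatMap, List.nil_append]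
  have hsingle : ∀ (l : List Char), l.flatMap (fun c => [toSup c]) = l.map toSup := by
    intro l
    induction l with
    | nil => rfl
    | cons a l ih => simp [ih]
  have hfm : (Nat.toDigits 10 p.natAbs).flatMap
      (fun c => ((((PySem.Int.ofChars? [c]).bind
        (fun k => PySem.List.pyGet? pySupChars k)).map (fun ch => [ch])).getD []))
      = (Nat.toDigits 10 p.natAbs).map toSup := by
    rw [← hsingle]
    apply List.flatMap_congr
    intro c hc
    exact chain_eq_toSup c (mem_toDigits _ c hc)
  rw [hfm]
  by_cases hp : p < 0
  · rw [if_pos hp, if_pos hp]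
    rw [if_pos (by decide)]
    rfl
  · rw [if_neg hp, if_neg hp]
    rw [if_neg (by decide)]
    rfl

-- B's arithmetic digit extraction equals the digit string of Nat.toDigits
lemma toDigitsCore_eq_dLoop : ∀ (f n : Nat) (ds : List Char), n < f →
    Nat.toDigitsCore 10 f n ds = dLoop (n / 10) (Nat.digitChar (n % 10) :: ds) := by
  intro f
  induction f with
  | zero => intro n ds h; omega
  | succ f ih =>
    intro n ds h
    simp only [Nat.toDigitsCore]
    by_cases h0 : n / 10 = 0
    · rw [if_pos h0, h0]
      simp [dLoop]
    · rw [if_neg h0]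
      rw [ih (n / 10) _ (by omega)]
      obtain ⟨m, hm⟩ : ∃ m, n / 10 = m + 1 := ⟨n / 10 - 1, by omega⟩
      rw [hm]
      simp [dLoop]

lemma sups_eq_toSup_digitChar (d : Nat) (h : d < 10) :
    pySupsB.getD d ' ' = toSup (Nat.digitChar d) := by
  interval_cases d <;> decide

lemma supLoop_map : ∀ (n : Nat) (out : List Char),
    supLoop n (out.map toSup) = (dLoop n out).map toSup := by
  intro n
  induction n using Nat.strong_induction_on with
  | _ n ih =>
    intro out
    match n with
    | 0 => simp [supLoop, dLoop]
    | m + 1 =>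
      have hs : pySupsB.getD ((m + 1) % 10) ' ' :: out.map toSup
          = (Nat.digitChar ((m + 1) % 10) :: out).map toSup := by
        rw [List.map_cons, sups_eq_toSup_digitChar _ (Nat.mod_lt _ (by norm_num))]
      simp only [supLoop, dLoop]
      rw [hs]
      exact ih _ (Nat.div_lt_self (Nat.succ_pos m) (by norm_num)) _

lemma supB_eq (m : Nat) : supB m = (Nat.toDigits 10 m).map toSup := by
  unfold supB Nat.toDigits
  rw [toDigitsCore_eq_dLoop (m + 1) m [] (Nat.lt_succ_self m)]
  rw [show [pySupsB.getD (m % 10) ' ']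
      = ([Nat.digitChar (m % 10)] : List Char).map toSup from by
    rw [List.map_cons, List.map_nil, sups_eq_toSup_digitChar _ (Nat.mod_lt _ (by norm_num))]]
  exact supLoop_map _ _

lemma supIf_eq_pvSup (e : Int) :
    (if e < 0 then '\u207B' :: supB (-e).toNat else supB e.toNat) = pvSup e := by
  unfold pvSup
  by_cases he : e < 0
  · rw [if_pos he, if_pos he, show (-e).toNat = e.natAbs from by omega, supB_eq]
    rfl
  · rw [if_neg he, if_neg he, show e.toNat = e.natAbs from by omega, supB_eq]
    rfl

lemma flatMap_sep_append (sep : List Char) (ts : List (List Char)) (x : List Char) :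
    (ts.flatMap (fun u => u ++ sep)) ++ x = PySem.Chars.join sep (ts ++ [x]) := by
  induction ts with
  | nil => simp [PySem.Chars.join_singleton]
  | cons u ts ih =>
    cases ts with
    | nil => simp [PySem.Chars.join_cons_cons, PySem.Chars.join_singleton]
    | cons v ts =>
      simp only [List.flatMap_cons, List.cons_append, PySem.Chars.join_cons_cons] at ih ⊢
      rw [← ih]
      simp [List.append_assoc]

-- A's last-element-special foldl equals join of the terms
lemma foldl_sep_join (t : Nat → List Char) (sep : List Char) (n : Nat) :
    (List.range n).foldl
      (fun acc k => if k ≠ n - 1 then acc ++ t k ++ sep else acc ++ t k) []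
    = PySem.Chars.join sep ((List.range n).map t) := by
  cases n with
  | zero => simp [PySem.Chars.join_nil]
  | succ m =>
    rw [List.range_succ, List.foldl_append, List.map_append]
    have hc : (List.range m).foldl
        (fun acc k => if k ≠ m + 1 - 1 then acc ++ t k ++ sep else acc ++ t k) []
        = (List.range m).foldl (fun acc k => acc ++ (t k ++ sep)) [] := by
      apply PySem.List.foldl_congr_mem
      intro acc k hk
      have hklt : k < m := List.mem_range.mp hk
      rw [if_pos (by omega)]
      simp [List.append_assoc]
    rw [hc, PySem.List.foldl_append_eq_flatMap]
    simp only [List.foldl_cons, List.foldl_nil, List.map_cons, List.map_nil, List.nil_append]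
    rw [if_neg (by omega)]
    rw [← flatMap_sep_append]
    simp [List.flatMap_map]

-- A's integer branch (descending loop) reduced to the joined term list
lemma A_nodot (cs : List Char) (base : Int) :
    (PySem.List.pyRange ((cs.length : Int) - 1) (-1) (-1)).foldl
      (fun acc digit =>
        let var_digit :=
          ((PySem.List.pyGet? cs ((cs.length : Int) - digit - 1)).map (fun c => [c])).getD []
        if digit ≠ 0 then
          acc ++ expanded_term var_digit base digit "+" ++ [' ', '+', ' ']
        else
          acc ++ expanded_term var_digit base digit "+") []
    = PySem.Chars.join [' ', '+', ' ']
        ((List.range cs.length).map (pvT cs base (cs.length : Int))) := by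
  rw [PySem.List.pyRange_neg_one,
    show ((cs.length : Int) - 1 - (-1)).toNat = cs.length from by omega, List.foldl_map]
  rw [PySem.List.foldl_congr_mem _ _
    (fun acc k => if k ≠ cs.length - 1 then acc ++ pvT cs base (cs.length : Int) k ++ [' ', '+', ' ']
      else acc ++ pvT cs base (cs.length : Int) k) _ ?_]
  · exact foldl_sep_join _ _ _
  · intro acc k hk
    have hklt : k < cs.length := List.mem_range.mp hk
    have harg : (cs.length : Int) - ((cs.length : Int) - 1 - (k : Int)) - 1 = ((k : Int)) := by omega
    have hget : ((PySem.List.pyGet? cs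
        ((cs.length : Int) - ((cs.length : Int) - 1 - (k : Int)) - 1)).map (fun c => [c])).getD []
        = [cs.getD k ' '] := by
      rw [harg, PySem.List.pyGet?_natCast, List.getElem?_eq_getElem hklt,
        List.getD_eq_getElem _ _ hklt]
      rfl
    have hp : ¬ ((cs.length : Int) - 1 - (k : Int) < 0) := by omega
    have hsp := special_eq_pvSup ((cs.length : Int) - 1 - (k : Int))
    rw [if_neg hp, if_neg hp] at hsp
    have hterm : expanded_term [cs.getD k ' '] base ((cs.length : Int) - 1 - (k : Int)) "+"
        = pvT cs base (cs.length : Int) k := by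
      unfold expanded_term pvT
      rw [hsp, show (cs.length : Int) - 1 - (k : Int) = (cs.length : Int) - (k : Int) - 1 from by
        omega]
      simp
    simp only [hget, hterm]
    by_cases hlast : k = cs.length - 1
    · rw [if_neg (by omega), if_neg (by omega)]
    · rw [if_pos (by omega), if_pos (by omega)]

-- A's decimal branch (forward loop with sign splitting) reduced to the joined term list
lemma A_dot (cs : List Char) (base : Int) (i : Int) :
    (PySem.List.pyRange 0 ((cs.length : Int)) 1).foldl
      (fun acc digit =>
        let raw := i - digit - 1
        let sp : String × Int := if raw < 0 then ("-", -raw) else ("+", raw)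
        let var_digit :=
          ((PySem.List.pyGet? cs digit).map (fun c => [c])).getD []
        if digit ≠ (cs.length : Int) - 1 then
          acc ++ expanded_term var_digit base sp.2 sp.1 ++ [' ', '+', ' ']
        else
          acc ++ expanded_term var_digit base sp.2 sp.1) []
    = PySem.Chars.join [' ', '+', ' ']
        ((List.range cs.length).map (pvT cs base i)) := by
  rw [PySem.List.pyRange_zero_natCast, List.foldl_map]
  rw [PySem.List.foldl_congr_mem _ _
    (fun acc k => if k ≠ cs.length - 1 then acc ++ pvT cs base i k ++ [' ', '+', ' ']
      else acc ++ pvT cs base i k) _ ?_]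
  · exact foldl_sep_join _ _ _
  · intro acc k hk
    have hklt : k < cs.length := List.mem_range.mp hk
    have hget : ((PySem.List.pyGet? cs ((k : Int))).map (fun c => [c])).getD []
        = [cs.getD k ' '] := by
      rw [PySem.List.pyGet?_natCast, List.getElem?_eq_getElem hklt,
        List.getD_eq_getElem _ _ hklt]
      rfl
    have hsp := special_eq_pvSup (i - (k : Int) - 1)
    have hterm : expanded_term [cs.getD k ' '] base
        (if i - (k : Int) - 1 < 0 then ("-", -(i - (k : Int) - 1)) else ("+", i - (k : Int) - 1)).2
        (if i - (k : Int) - 1 < 0 then ("-", -(i - (k : Int) - 1)) else ("+", i - (k : Int) - 1)).1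
        = pvT cs base i k := by
      rw [apply_ite Prod.snd, apply_ite Prod.fst]
      unfold expanded_term pvT
      rw [hsp]
      simp
    simp only [hget, hterm]
    by_cases hlast : k = cs.length - 1
    · rw [if_neg (by omega), if_neg (by omega)]
    · rw [if_pos (by omega), if_pos (by omega)]

-- term shift: dropping the head character lowers the pivot by one
lemma pvT_shift (ch : Char) (rest : List Char) (base pivot : Int) (k : Nat) :
    pvT (ch :: rest) base pivot (k + 1) = pvT rest base (pivot - 1) k := by
  have h : pivot - (((k + 1 : Nat)) : Int) - 1 = pivot - 1 - (k : Int) - 1 := by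
    push_cast; omega
  unfold pvT
  rw [List.getD_cons_succ, h]

-- B's back-to-front fold collects the terms in reverse order (final e = pivot)
lemma Bfold (base : Int) : ∀ (cs : List Char) (pivot : Int),
    cs.foldr (fun ch st => stepB base st ch) ([], pivot - (cs.length : Int))
    = (((List.range cs.length).map (pvT cs base pivot)).reverse, pivot) := by
  intro cs
  induction cs with
  | nil =>
    intro pivot
    simp
  | cons ch rest ih =>
    intro pivot
    rw [List.foldr_cons]
    rw [show (([] : List (List Char)), pivot - ((ch :: rest).length : Int))
        = ([], (pivot - 1) - (rest.length : Int)) from by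
      have h : pivot - ((ch :: rest).length : Int) = (pivot - 1) - (rest.length : Int) := by
        rw [List.length_cons]; push_cast; omega
      rw [h]]
    rw [ih (pivot - 1)]
    unfold stepB
    simp only [supIf_eq_pvSup]
    have hmap : (List.range (ch :: rest).length).map (pvT (ch :: rest) base pivot)
        = pvT (ch :: rest) base pivot 0
          :: (List.range rest.length).map (pvT rest base (pivot - 1)) := by
      rw [List.length_cons, List.range_succ_eq_map, List.map_cons, List.map_map]
      congr 1
      apply List.map_congr_left
      intro k _
      exact pvT_shift ch rest base pivot k
    rw [hmap, List.reverse_cons]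
    simp only [Prod.mk.injEq]
    refine ⟨?_, by omega⟩
    congr 1
    simp [pvT]

-- ===== VERDICT (by name: the statement is the Claim_ definition above) =====
theorem full_expansion_spec : Claim_equal_full_expansion := by
  intro var_num var_base _
  unfold Spec_full_expansion full_expansion full_expansion_alt
  cases h : PySem.List.index? var_num.toList '.' with
  | none =>
    simp only [h]
    rw [if_pos (by decide)]
    rw [List.append_nil, List.foldl_reverse, Bfold]
    rw [List.reverse_reverse]
    exact congrArg String.ofList (A_nodot var_num.toList var_base)
  | some i =>
    obtain ⟨pre, suf, hs, hlen, -⟩ := (PySem.List.index?_eq_some_iff _ _ _).mp h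
    have hi : i < var_num.toList.length := by
      rw [hs, List.length_append, List.length_cons]; omega
    simp only [h]
    rw [PySem.List.pop?_natCast _ _ hi]
    have herase : var_num.toList.eraseIdx i = pre ++ suf := by
      rw [hs, ← hlen]
      simp [List.eraseIdx_append_of_length_le]
    have htd : var_num.toList.take i ++ var_num.toList.drop (i + 1) = pre ++ suf := by
      rw [hs, ← hlen]
      simp [List.drop_append]
    have htake : ((var_num.toList.take i).length : Int) = (i : Int) := by
      rw [List.length_take]
      have := hi
      omega
    simp only [Option.map_some, Option.getD_some, herase, htd, htake]
    rw [if_neg (by simp)]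
    rw [List.foldl_reverse, Bfold]
    rw [List.reverse_reverse]
    exact congrArg String.ofList (A_dot (pre ++ suf) var_base (i : Int))
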